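-- pv_equiv track=rewrite | github.com/apostlez/algorithm-Exams | 2024q2/3_counting.py | removeRobot_rec
-- ===== SOURCE A (Python) =====
-- def removeRobot_rec(robots, L, U, B, N, ori_L):
--     # check L
--     if sum(L) == 0:
--         # count remained U with remain robot
--         # [0, 0, 0], [1, 0, 1]
--         available_build = [0] * len(U)
--         for robot in robots:
--             if B > ori_L[robot[1]] + available_build[robot[1]]:
--                 available_build[robot[1]] += 1
--             if available_build[robot[1]] >= U[robot[1]]:
--                 available_build[robot[1]] = U[robot[1]]
--         return sum(available_build)
--     max_guard = -1
--     found = False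
--     for ir in range(len(robots)):
--         if L[robots[ir][1]] > 0:
--             found = True
--             L[robots[ir][1]] = L[robots[ir][1]] - 1
--             U[robots[ir][1]] = U[robots[ir][1]] - 1
--             removed_robot = robots.pop(ir)
--             ret = removeRobot_rec(robots, L, U, B, N, ori_L)
--             robots.insert(ir, removed_robot)
--             L[robots[ir][1]] = L[robots[ir][1]] + 1
--             U[robots[ir][1]] = U[robots[ir][1]] + 1
--             max_guard = max(ret, max_guard)
--     if found == False:
--         return -1
--     return max_guard
-- ===== SOURCE B (Python) =====
-- def removeRobot_rec(robots, L, U, B, N, ori_L):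
--     # Count robots per type once, check that each type's required removals are
--     # satisfiable, then simulate each type's build budget independently.
--     cnt = [0] * len(U)
--     for robot in robots:
--         cnt[robot[1]] += 1
--     if any(l < 0 or c < l for c, l in zip(cnt, L)):
--         return -1
--     total = 0
--     for c, l, u, o in zip(cnt, L, U, ori_L):
--         cap = u - l
--         a = 0
--         for _ in range(c - l):
--             if B > o + a:
--                 a += 1
--             if a >= cap:
--                 a = cap
--         total += a
--     return total
-- ===== Notes on version B (the rewrite author's own statement) =====
-- stated objective: alternative
-- what changed: B replaces A's backtracking recursion over all removal orders by one counting pass per type, a satisfiability check of the required removals, and an independent per-type budget simulation over the zipped quota lists; Pre_ excludes inputs where A raises (short robots, out-of-range types, some mismatched-length shapes) and, except where A is trivially infeasible or empty, degenerate quota lists (a negative L entry, L[t]>U[t], nonzero entries beyond the common zip length) where A's -1 sentinel clamping and aliased-slot backtracking are accidental.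
-- outside the precondition, e.g. on removeRobot_rec([], [-1, 1], [0, 0], 1, 0, [0, 0]): A returns 0, B returns -1; on removeRobot_rec([[0, 0], [0, 0], [0, 0]], [2], [0], 5, 0, [0]): A returns -1, B returns -2; on removeRobot_rec([], [0, -28], [1], -4, 0, []): A returns -1, B returns 0
import Mathlib
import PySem

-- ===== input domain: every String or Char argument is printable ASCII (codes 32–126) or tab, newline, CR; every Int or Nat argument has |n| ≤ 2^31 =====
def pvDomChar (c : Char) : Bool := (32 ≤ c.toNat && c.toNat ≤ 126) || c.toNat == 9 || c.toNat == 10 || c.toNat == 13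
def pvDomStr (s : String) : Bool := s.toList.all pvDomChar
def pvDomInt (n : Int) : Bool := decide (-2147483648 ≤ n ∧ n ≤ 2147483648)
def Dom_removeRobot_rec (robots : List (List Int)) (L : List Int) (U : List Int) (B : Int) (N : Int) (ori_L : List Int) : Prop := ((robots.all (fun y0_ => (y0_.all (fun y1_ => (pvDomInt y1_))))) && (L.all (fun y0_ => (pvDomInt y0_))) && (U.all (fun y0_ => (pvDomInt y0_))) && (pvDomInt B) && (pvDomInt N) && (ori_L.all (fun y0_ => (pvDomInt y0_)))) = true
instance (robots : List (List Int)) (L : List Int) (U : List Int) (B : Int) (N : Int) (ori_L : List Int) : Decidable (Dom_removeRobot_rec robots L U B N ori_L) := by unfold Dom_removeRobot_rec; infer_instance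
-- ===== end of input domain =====

-- B replaces A's exponential backtracking over removal orders by one counting pass per
-- type plus an independent per-type budget simulation; equivalence is about return
-- values only (A temporarily mutates robots/L/U in place but restores them).

-- ===== PORT A =====
-- xs[i] / robots[i] with Python indexing; total form used under Pre_ (in range there)
def pvGetI (xs : List Int) (i : Int) : Int := PySem.List.pyGetD xs i 0
def pvGetR (xs : List (List Int)) (i : Int) : List Int := PySem.List.pyGetD xs i []

-- one robot of A's base-case loop body (increment available_build then cap at U)
def aBaseStep (U ori_L : List Int) (B : Int) (ab : List Int) (robot : List Int) : List Int :=
  let t := pvGetI robot 1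
  let ab := if B > pvGetI ori_L t + pvGetI ab t then PySem.List.pySetD ab t (pvGetI ab t + 1) else ab
  if pvGetI ab t ≥ pvGetI U t then PySem.List.pySetD ab t (pvGetI U t) else ab

mutual
def removeRobot_rec (robots : List (List Int)) (L : List Int) (U : List Int) (B : Int) (N : Int) (ori_L : List Int) : Int :=
  if L.sum = 0 then
    (robots.foldl (aBaseStep U ori_L B) (List.replicate U.length 0)).sum
  else
    aLoopA robots L U B N ori_L (List.range robots.length) false (-1)
termination_by (robots.length, robots.length + 1)
decreasing_by simp_wf; omega

-- A's 'for ir in range(len(robots))' loop with (found, max_guard) state; the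
-- 'if h : ir < robots.length' is a totality guard only (irs always comes from range)
def aLoopA (robots : List (List Int)) (L : List Int) (U : List Int) (B : Int) (N : Int) (ori_L : List Int) (irs : List Nat) (found : Bool) (mg : Int) : Int :=
  match irs with
  | [] => if found = false then -1 else mg
  | ir :: rest =>
    let t := pvGetI (pvGetR robots (ir : Int)) 1
    if 0 < pvGetI L t then
      if h : ir < robots.length then
        let ret := removeRobot_rec (robots.eraseIdx ir)
          (PySem.List.pySetD L t (pvGetI L t - 1))
          (PySem.List.pySetD U t (pvGetI U t - 1)) B N ori_L
        aLoopA robots L U B N ori_L rest true (max ret mg)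
      else aLoopA robots L U B N ori_L rest true mg
    else aLoopA robots L U B N ori_L rest found mg
termination_by (robots.length, irs.length)
decreasing_by
  · left; have := List.length_eraseIdx_of_lt (l := robots) (i := ir) h; omega
  · simp_wf; omega
  · simp_wf; omega
  · simp_wf; omega
end

-- ===== PORT B =====
-- one step of B's per-type budget simulation
def bSimStep (B oriT cap a : Int) : Int :=
  let a := if B > oriT + a then a + 1 else a
  if a ≥ cap then cap else a

def removeRobot_rec_alt (robots : List (List Int)) (L : List Int) (U : List Int) (B : Int) (N : Int) (ori_L : List Int) : Int :=
  let cnt := robots.foldl (fun c robot =>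
    PySem.List.pySetD c (pvGetI robot 1) (pvGetI c (pvGetI robot 1) + 1)) (List.replicate U.length 0)
  if (cnt.zip L).any (fun p => p.2 < 0 || p.1 < p.2) then -1
  else
    ((cnt.zip L).zip (U.zip ori_L)).foldl (fun (tot : Int) q =>
      let cap := q.2.1 - q.1.2
      tot + (List.range (q.1.1 - q.1.2).toNat).foldl
        (fun a _ => bSimStep B q.2.2 cap a) 0) 0

-- ===== PRECONDITION & SPEC =====
-- normalized slot (as Int in [0,n)) a robot's type indexes in every length-n list
def slotI (n : Nat) (r : List Int) : Int := (pvGetI r 1) % (n : Int)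

def typesL (n : Nat) (robots : List (List Int)) : List Int := robots.map (slotI n)

-- Pre_ excludes inputs on which A raises (robot shorter than 2, robot type out of Python
-- range, some mismatched-length shapes) and -- except where A is trivially infeasible or
-- trivially empty, where A provably answers -1 resp. 0 -- degenerate quota lists with a
-- negative L entry or with L[t] > U[t] (contradictory lower/upper bounds) or with entries
-- beyond the zip-truncated common length, where A's backtracking value is an accident of
-- its -1 sentinel clamping and of which aliased slots its removal game happens to touch.
def Pre_removeRobot_rec (robots : List (List Int)) (L : List Int) (U : List Int) (B : Int) (N : Int) (ori_L : List Int) : Prop :=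
  (U.length = L.length ∧ ori_L.length = L.length ∧
    (∀ r ∈ robots, 2 ≤ r.length ∧ -(L.length : Int) ≤ pvGetI r 1 ∧ pvGetI r 1 < (L.length : Int)) ∧
    (∀ x ∈ L, 0 ≤ x) ∧
    (L.sum = 0 ∨ (∀ j < L.length, L.getD j 0 ≤ U.getD j 0) ∨
      ∃ j < L.length, ((typesL L.length robots).count (j : Int) : Int) < L.getD j 0)) ∨
  (L.sum ≠ 0 ∧
    (∀ r ∈ robots, 2 ≤ r.length ∧
      -(L.length : Int) ≤ pvGetI r 1 ∧ pvGetI r 1 < (L.length : Int) ∧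
      -(U.length : Int) ≤ pvGetI r 1 ∧ pvGetI r 1 < (U.length : Int)) ∧
    (∀ r ∈ robots, pvGetI L (pvGetI r 1) ≤ 0) ∧
    ((∃ t < min L.length U.length, L.getD t 0 < 0) ∨
     (U.length = L.length ∧ 0 < L.sum) ∨
     (robots = [] ∧ ∃ t < min L.length U.length, L.getD t 0 ≠ 0))) ∨
  (robots = [] ∧ L.sum = 0 ∧ ∀ t < min L.length U.length, L.getD t 0 = 0)
instance (robots : List (List Int)) (L : List Int) (U : List Int) (B : Int) (N : Int) (ori_L : List Int) : Decidable (Pre_removeRobot_rec robots L U B N ori_L) := by unfold Pre_removeRobot_rec; infer_instance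

def pvWitness_removeRobot_rec : List (List Int) × List Int × List Int × Int × Int × List Int :=
  ([[0, 0]], [0], [2], 1, 0, [0])

def Spec_removeRobot_rec (robots : List (List Int)) (L : List Int) (U : List Int) (B : Int) (N : Int) (ori_L : List Int) (out : Int) : Prop := out = removeRobot_rec_alt robots L U B N ori_L
instance (robots : List (List Int)) (L : List Int) (U : List Int) (B : Int) (N : Int) (ori_L : List Int) (out : Int) : Decidable (Spec_removeRobot_rec robots L U B N ori_L out) := by unfold Spec_removeRobot_rec; infer_instance

-- ===== CLAIM (what is proved, stated in full; the proofs are below) =====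
def Claim_equal_removeRobot_rec : Prop := ∀ (robots : List (List Int)) (L : List Int) (U : List Int) (B : Int) (N : Int) (ori_L : List Int), Dom_removeRobot_rec robots L U B N ori_L → Pre_removeRobot_rec robots L U B N ori_L → Spec_removeRobot_rec robots L U B N ori_L (removeRobot_rec robots L U B N ori_L)

-- ===== LEMMAS AND PROOFS =====

-- m applications of the per-robot budget step, starting from 0
def simF (B oriT cap : Int) : Nat → Int
  | 0 => 0
  | m + 1 => bSimStep B oriT cap (simF B oriT cap m)

-- the common value: per-slot budget simulation after the forced removals
def valV (B : Int) (ori_L : List Int) (n : Nat) (ts L U : List Int) : Int :=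
  ∑ j ∈ Finset.range n,
    simF B (ori_L.getD j 0) (U.getD j 0 - L.getD j 0) (((ts.count (j : Int) : Int) - L.getD j 0).toNat)

def feasV (n : Nat) (ts L : List Int) : Bool :=
  (List.range n).all (fun j => L.getD j 0 ≤ (ts.count (j : Int) : Int))

def specV (B : Int) (ori_L : List Int) (n : Nat) (robots : List (List Int)) (L U : List Int) : Int :=
  if L.sum = 0 then valV B ori_L n (typesL n robots) L U
  else if feasV n (typesL n robots) L then max (valV B ori_L n (typesL n robots) L U) (-1)
  else -1

lemma feasV_iff (n : Nat) (ts L : List Int) :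
    feasV n ts L = true ↔ ∀ j < n, L.getD j 0 ≤ (ts.count (j : Int) : Int) := by
  simp [feasV]

lemma sum_getD (l : List Int) : l.sum = ∑ j ∈ Finset.range l.length, l.getD j 0 := by
  induction l with
  | nil => simp
  | cons a l ih =>
    rw [List.sum_cons, List.length_cons, Finset.sum_range_succ', ih]
    simp [List.getD]
    ring

lemma getD_set_int (l : List Int) (s j : Nat) (v : Int) (hs : s < l.length) :
    (l.set s v).getD j 0 = if j = s then v else l.getD j 0 := by
  by_cases hj : j < l.length
  · rw [List.getD_eq_getElem _ _ (by simpa using hj), List.getElem_set]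
    split_ifs with h1 h2 h3 <;> first | rfl | (exfalso; omega) | rw [List.getD_eq_getElem _ _ hj]
  · rw [List.getD_eq_default _ _ (by simpa using (by omega : l.length ≤ j)),
        List.getD_eq_default _ _ (by omega)]
    split_ifs with h1
    · omega
    · rfl

lemma sum_set_int (l : List Int) (s : Nat) (v : Int) (hs : s < l.length) :
    (l.set s v).sum = l.sum - l.getD s 0 + v := by
  induction l generalizing s with
  | nil => simp at hs
  | cons a l ih =>
    cases s with
    | zero => simp [List.getD]; ring
    | succ s =>
      have := ih s (by simpa using hs)
      simp only [List.set_cons_succ, List.sum_cons, this, List.getD_cons_succ]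
      ring

lemma emod_neg_eq (t : Int) (n : Nat) (h1 : -(n : Int) ≤ t) (h2 : t < 0) :
    t % (n : Int) = t + n := by
  have h3 : (t + (n:Int) * 1) % (n:Int) = t % (n:Int) := Int.add_mul_emod_self_left t (n:Int) 1
  rw [mul_one] at h3
  rw [← h3, Int.emod_eq_of_lt (by omega) (by omega)]

lemma pvGetI_emod (xs : List Int) (t : Int) (h1 : -(xs.length : Int) ≤ t) (h2 : t < (xs.length : Int)) :
    pvGetI xs t = xs.getD (t % (xs.length : Int)).toNat 0 := by
  by_cases ht : 0 ≤ t
  · rw [pvGetI, PySem.List.pyGetD_eq_getElem xs 0 ht h2, Int.emod_eq_of_lt ht h2,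
      List.getD_eq_getElem _ _ (by omega)]
  · rw [emod_neg_eq t _ h1 (by omega)]
    have hk : t = -((-t).toNat : Int) := by omega
    rw [pvGetI, hk, PySem.List.pyGetD_neg_natCast xs (-t).toNat 0 (by omega) (by omega),
      List.getD_eq_getElem _ _ (by omega)]
    congr 1
    omega

lemma pvSetD_emod (xs : List Int) (t : Int) (v : Int) (h1 : -(xs.length : Int) ≤ t) (h2 : t < (xs.length : Int)) :
    PySem.List.pySetD xs t v = xs.set (t % (xs.length : Int)).toNat v := by
  by_cases ht : 0 ≤ t
  · rw [PySem.List.pySetD_of_nonneg xs v ht, Int.emod_eq_of_lt ht h2]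
  · rw [emod_neg_eq t _ h1 (by omega)]
    simp only [PySem.List.pySetD, PySem.List.pySet?, PySem.List.pyIdx?, if_neg (by omega : ¬ 0 ≤ t), if_pos h1]
    simp only [Option.map_some, Option.getD_some]
    congr 1
    omega

lemma slot_lt (n : Nat) (r : List Int) (hn : 0 < n) :
    0 ≤ slotI n r ∧ slotI n r < n := by
  constructor
  · exact Int.emod_nonneg _ (by exact_mod_cast hn.ne')
  · exact Int.emod_lt_of_pos _ (by exact_mod_cast hn)

lemma count_eraseIdx_int (l : List Int) (i : Nat) (h : i < l.length) (v : Int) :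
    (l.eraseIdx i).count v + (if l[i] = v then 1 else 0) = l.count v := by
  have hdec : l.count v = (l.take i).count v + ((l.drop (i + 1)).count v + if l[i] == v then 1 else 0) := by
    conv_lhs => rw [← List.take_append_drop i l, List.drop_eq_getElem_cons h]
    rw [List.count_append, List.count_cons]
  rw [List.eraseIdx_eq_take_drop_succ, List.count_append, hdec]
  by_cases hv : l[i] = v <;> simp [beq_iff_eq, hv] <;> omega

-- indexing / setting an equal-length list through a robot's raw type hits its slot
lemma pvGetI_slot (xs : List Int) (n : Nat) (r : List Int) (hx : xs.length = n)
    (hr : -(n : Int) ≤ pvGetI r 1 ∧ pvGetI r 1 < (n : Int)) :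
    pvGetI xs (pvGetI r 1) = xs.getD (slotI n r).toNat 0 := by
  subst hx
  exact pvGetI_emod xs (pvGetI r 1) hr.1 hr.2

lemma pvSetD_slot (xs : List Int) (n : Nat) (r : List Int) (v : Int) (hx : xs.length = n)
    (hr : -(n : Int) ≤ pvGetI r 1 ∧ pvGetI r 1 < (n : Int)) :
    PySem.List.pySetD xs (pvGetI r 1) v = xs.set (slotI n r).toNat v := by
  subst hx
  exact pvSetD_emod xs (pvGetI r 1) v hr.1 hr.2

lemma pos_of_robot (n : Nat) (r : List Int)
    (hr : -(n : Int) ≤ pvGetI r 1 ∧ pvGetI r 1 < (n : Int)) : 0 < n := by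
  rcases hr with ⟨h1, h2⟩
  by_contra h
  have : n = 0 := by omega
  subst this
  simp at h1 h2
  omega

-- A's base-loop body touches only the robot's slot, applying one bSimStep there
lemma aBaseStep_getD (U ori_L : List Int) (B : Int) (ab : List Int) (r : List Int) (n : Nat)
    (hU : U.length = n) (hO : ori_L.length = n) (hab : ab.length = n)
    (hr : -(n : Int) ≤ pvGetI r 1 ∧ pvGetI r 1 < (n : Int)) :
    (aBaseStep U ori_L B ab r).length = n ∧
    ∀ j, (aBaseStep U ori_L B ab r).getD j 0 =
      if (j : Int) = slotI n r then
        bSimStep B (ori_L.getD (slotI n r).toNat 0) (U.getD (slotI n r).toNat 0) (ab.getD (slotI n r).toNat 0)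
      else ab.getD j 0 := by
  have hn : 0 < n := pos_of_robot n r hr
  have hsl := slot_lt n r hn
  have hsn : (slotI n r).toNat < n := by omega
  set s := (slotI n r).toNat with hs
  have hjiff : ∀ j : Nat, ((j : Int) = slotI n r) ↔ j = s := by intro j; omega
  simp only [aBaseStep, pvGetI_slot ori_L n r hO hr, pvGetI_slot ab n r hab hr,
    pvGetI_slot U n r hU hr, pvSetD_slot ab n r _ hab hr, ← hs]
  by_cases c1 : B > ori_L.getD s 0 + ab.getD s 0
  · rw [if_pos c1]
    have hl1 : (ab.set s (ab.getD s 0 + 1)).length = n := by simp [hab]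
    have hg1 : ∀ j, (ab.set s (ab.getD s 0 + 1)).getD j 0 = if j = s then ab.getD s 0 + 1 else ab.getD j 0 :=
      fun j => getD_set_int ab s j _ (by omega)
    simp only [pvGetI_slot _ n r hl1 hr, pvSetD_slot _ n r _ hl1 hr, ← hs, hg1 s, eq_self_iff_true, if_true]
    by_cases c2 : ab.getD s 0 + 1 ≥ U.getD s 0
    · rw [if_pos c2]
      refine ⟨by simp [hab], fun j => ?_⟩
      rw [getD_set_int _ s j _ (by omega), hg1 j]
      simp only [hjiff j, bSimStep, if_pos c1, if_pos c2]
      split_ifs with h <;> simp [h]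
    · rw [if_neg c2]
      refine ⟨hl1, fun j => ?_⟩
      rw [hg1 j]
      simp only [hjiff j, bSimStep, if_pos c1, if_neg c2]
  · rw [if_neg c1]
    simp only [pvGetI_slot ab n r hab hr, pvSetD_slot ab n r _ hab hr, ← hs]
    by_cases c2 : ab.getD s 0 ≥ U.getD s 0
    · rw [if_pos c2]
      refine ⟨by simp [hab], fun j => ?_⟩
      rw [getD_set_int _ s j _ (by omega)]
      simp only [hjiff j, bSimStep, if_neg c1, if_pos c2]
    · rw [if_neg c2]
      refine ⟨hab, fun j => ?_⟩
      simp only [hjiff j, bSimStep, if_neg c1, if_neg c2]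
      split_ifs with h <;> simp [h]

lemma foldBase (B : Int) (U ori_L : List Int) (n : Nat) (hU : U.length = n) (hO : ori_L.length = n) :
    ∀ (robots : List (List Int)), (∀ r ∈ robots, -(n : Int) ≤ pvGetI r 1 ∧ pvGetI r 1 < (n : Int)) →
    ∀ (ab : List Int), ab.length = n → ∀ (c : Nat → Nat),
    (∀ j, ab.getD j 0 = simF B (ori_L.getD j 0) (U.getD j 0) (c j)) →
    (robots.foldl (aBaseStep U ori_L B) ab).length = n ∧
    ∀ j, (robots.foldl (aBaseStep U ori_L B) ab).getD j 0 =
      simF B (ori_L.getD j 0) (U.getD j 0) (c j + (typesL n robots).count (j : Int)) := by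
  intro robots
  induction robots with
  | nil =>
    intro _ ab hab c hc
    exact ⟨hab, fun j => by simpa [typesL] using hc j⟩
  | cons r rest ih =>
    intro hr ab hab c hc
    have hrr := hr r (by simp)
    obtain ⟨hl1, hg1⟩ := aBaseStep_getD U ori_L B ab r n hU hO hab hrr
    have hsl := slot_lt n r (pos_of_robot n r hrr)
    rw [List.foldl_cons]
    obtain ⟨hL, hG⟩ := ih (fun x hx => hr x (by simp [hx])) (aBaseStep U ori_L B ab r) hl1
      (fun j => if (j : Int) = slotI n r then c j + 1 else c j)
      (fun j => by
        have hgg := hg1 j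
        by_cases hj : (j : Int) = slotI n r
        · have hjs : (slotI n r).toNat = j := by omega
          simp only [hgg, if_pos hj, hjs, simF, hc j]
        · simp only [hgg, if_neg hj, hc j])
    refine ⟨hL, fun j => ?_⟩
    rw [hG j]
    have hcnt : (if (j : Int) = slotI n r then c j + 1 else c j) + (typesL n rest).count (j : Int)
        = c j + (typesL n (r :: rest)).count (j : Int) := by
      have : typesL n (r :: rest) = slotI n r :: typesL n rest := rfl
      rw [this, List.count_cons]
      split_ifs with h1 h2 h2 <;> simp [beq_iff_eq] at h2 <;> omega
    rw [hcnt]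

-- B's counting loop: after the fold, slot j holds the number of robots on slot j
lemma foldCnt (n : Nat) :
    ∀ (robots : List (List Int)), (∀ r ∈ robots, -(n : Int) ≤ pvGetI r 1 ∧ pvGetI r 1 < (n : Int)) →
    ∀ (c : List Int), c.length = n →
    (robots.foldl (fun c robot =>
      PySem.List.pySetD c (pvGetI robot 1) (pvGetI c (pvGetI robot 1) + 1)) c).length = n ∧
    ∀ j, (robots.foldl (fun c robot =>
      PySem.List.pySetD c (pvGetI robot 1) (pvGetI c (pvGetI robot 1) + 1)) c).getD j 0 =
      c.getD j 0 + ((typesL n robots).count (j : Int) : Int) := by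
  intro robots
  induction robots with
  | nil =>
    intro _ c hc
    refine ⟨hc, fun j => by simp [typesL]⟩
  | cons r rest ih =>
    intro hr c hc
    have hrr := hr r (by simp)
    have hn : 0 < n := pos_of_robot n r hrr
    have hsl := slot_lt n r hn
    set s := (slotI n r).toNat with hs
    have hsn : s < n := by omega
    rw [List.foldl_cons]
    have hstep : PySem.List.pySetD c (pvGetI r 1) (pvGetI c (pvGetI r 1) + 1)
        = c.set s (c.getD s 0 + 1) := by
      rw [pvGetI_slot c n r hc hrr, pvSetD_slot c n r _ hc hrr, ← hs]
    rw [hstep]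
    obtain ⟨hL, hG⟩ := ih (fun x hx => hr x (by simp [hx])) (c.set s (c.getD s 0 + 1)) (by simp [hc])
    refine ⟨hL, fun j => ?_⟩
    rw [hG j, getD_set_int c s j _ (by omega)]
    have hct : typesL n (r :: rest) = slotI n r :: typesL n rest := rfl
    rw [hct, List.count_cons]
    by_cases hj : j = s
    · rw [if_pos hj, if_pos (by simp [beq_iff_eq]; omega : (slotI n r == (j : Int)) = true)]
      rw [hj]
      push_cast
      ring
    · rw [if_neg hj, if_neg (by simp [beq_iff_eq]; omega : ¬ (slotI n r == (j : Int)) = true)]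
      push_cast
      ring

-- the inner 'for _ in range(k)' loop of B is simF
lemma foldSim (B oriT cap : Int) (k : Nat) :
    (List.range k).foldl (fun a _ => bSimStep B oriT cap a) 0 = simF B oriT cap k := by
  induction k with
  | zero => rfl
  | succ k ih => rw [List.range_succ, List.foldl_append, ih]; rfl

lemma foldl_range_add (f : Nat → Int) (n : Nat) :
    ∀ init : Int, (List.range n).foldl (fun tot t => tot + f t) init
      = init + ∑ j ∈ Finset.range n, f j := by
  induction n with
  | zero => simp
  | succ n ih =>
    intro init
    rw [List.range_succ, List.foldl_append, ih, Finset.sum_range_succ]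
    simp [add_assoc]

lemma simF_nonneg (B oriT cap : Int) (hc : 0 ≤ cap) : ∀ m, 0 ≤ simF B oriT cap m := by
  intro m
  induction m with
  | zero => simp [simF]
  | succ m ih =>
    simp only [simF, bSimStep]
    split_ifs <;> omega

-- A's removal loop: every qualifying branch yields the same value w
lemma aLoop_eq (B N : Int) (ori_L : List Int) (robots : List (List Int)) (L U : List Int) (w : Int)
    (hbr : ∀ ir, ir < robots.length → 0 < pvGetI L (pvGetI (pvGetR robots (ir : Int)) 1) →
      removeRobot_rec (robots.eraseIdx ir)
        (PySem.List.pySetD L (pvGetI (pvGetR robots (ir : Int)) 1) (pvGetI L (pvGetI (pvGetR robots (ir : Int)) 1) - 1))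
        (PySem.List.pySetD U (pvGetI (pvGetR robots (ir : Int)) 1) (pvGetI U (pvGetI (pvGetR robots (ir : Int)) 1) - 1)) B N ori_L = w) :
    ∀ (irs : List Nat), (∀ ir ∈ irs, ir < robots.length) → ∀ (found : Bool) (mg : Int),
    aLoopA robots L U B N ori_L irs found mg =
      if ∃ ir ∈ irs, 0 < pvGetI L (pvGetI (pvGetR robots (ir : Int)) 1) then max w mg
      else if found then mg else -1 := by
  intro irs
  induction irs with
  | nil =>
    intro _ found mg
    cases found <;> simp [aLoopA]
  | cons ir rest ih =>
    intro hall found mg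
    have hlt := hall ir (by simp)
    rw [aLoopA]
    simp only []
    by_cases hq : 0 < pvGetI L (pvGetI (pvGetR robots (ir : Int)) 1)
    · rw [if_pos hq, dif_pos hlt, hbr ir hlt hq,
        ih (fun x hx => hall x (by simp [hx])) true (max w mg)]
      rw [if_pos (by exact ⟨ir, by simp, hq⟩ :
        ∃ x ∈ ir :: rest, 0 < pvGetI L (pvGetI (pvGetR robots (x : Int)) 1))]
      by_cases hex : ∃ x ∈ rest, 0 < pvGetI L (pvGetI (pvGetR robots (x : Int)) 1)
      · rw [if_pos hex, ← max_assoc, max_self]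
      · rw [if_neg hex]
        simp
    · rw [if_neg hq, ih (fun x hx => hall x (by simp [hx])) found mg]
      have : (∃ x ∈ ir :: rest, 0 < pvGetI L (pvGetI (pvGetR robots (x : Int)) 1)) ↔
          (∃ x ∈ rest, 0 < pvGetI L (pvGetI (pvGetR robots (x : Int)) 1)) := by
        constructor
        · rintro ⟨x, hx, hxq⟩
          rcases List.mem_cons.mp hx with h | h
          · exact absurd (h ▸ hxq) hq
          · exact ⟨x, h, hxq⟩
        · rintro ⟨x, hx, hxq⟩; exact ⟨x, by simp [hx], hxq⟩
      simp only [this]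

lemma count_types_erase (n : Nat) (robots : List (List Int)) (ir : Nat) (hlt : ir < robots.length) (j : Int) :
    (typesL n (robots.eraseIdx ir)).count j + (if slotI n robots[ir] = j then 1 else 0)
      = (typesL n robots).count j := by
  have h1 : typesL n (robots.eraseIdx ir) = (typesL n robots).eraseIdx ir :=
    (List.eraseIdx_map (slotI n) robots ir).symm
  have h2 : (typesL n robots)[ir]'(by simpa [typesL] using hlt) = slotI n robots[ir] := by
    simp [typesL]
  rw [h1, ← h2]
  exact count_eraseIdx_int (typesL n robots) ir (by simpa [typesL] using hlt) j

lemma sum_nonneg_getD (L : List Int) (hLpos : ∀ j, 0 ≤ L.getD j 0) : 0 ≤ L.sum := by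
  rw [sum_getD]
  exact Finset.sum_nonneg (fun j _ => hLpos j)

lemma exists_pos_slot (L : List Int) (hS : 0 < L.sum) :
    ∃ j < L.length, 0 < L.getD j 0 := by
  rw [sum_getD] at hS
  obtain ⟨j, hj, hjpos⟩ := Finset.exists_lt_of_sum_lt (by simpa using hS :
    ∑ _j ∈ Finset.range L.length, (0 : Int) < ∑ j ∈ Finset.range L.length, L.getD j 0)
  exact ⟨j, Finset.mem_range.mp hj, hjpos⟩

lemma sum_pos_of_unfeas (n : Nat) (ts L : List Int) (hL : L.length = n)
    (hLpos : ∀ j, 0 ≤ L.getD j 0) (hnf : ¬ feasV n ts L = true) : 0 < L.sum := by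
  rw [feasV_iff] at hnf
  push_neg at hnf
  obtain ⟨j, hj, hlt⟩ := hnf
  have hpos : 0 < L.getD j 0 := by omega
  rw [sum_getD, hL]
  exact lt_of_lt_of_le hpos (Finset.single_le_sum (fun i _ => hLpos i) (Finset.mem_range.mpr hj))

lemma main_eq (B N : Int) (ori_L : List Int) (n : Nat) (hO : ori_L.length = n) :
    ∀ (k : Nat) (robots : List (List Int)) (L U : List Int), robots.length ≤ k →
    L.length = n → U.length = n → (∀ j, 0 ≤ L.getD j 0) →
    (∀ r ∈ robots, -(n : Int) ≤ pvGetI r 1 ∧ pvGetI r 1 < (n : Int)) →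
    removeRobot_rec robots L U B N ori_L = specV B ori_L n robots L U := by
  intro k
  induction k using Nat.strong_induction_on with
  | _ k ih =>
  intro robots L U hk hL hU hLpos hr
  rw [removeRobot_rec]
  by_cases hS : L.sum = 0
  · -- base case: every L slot is 0, the fold simulates each slot independently
    rw [if_pos hS]
    have hz : ∀ j, L.getD j 0 = 0 := by
      intro j
      by_cases hj : j < L.length
      · have h0 : ∑ i ∈ Finset.range L.length, L.getD i 0 = 0 := by rw [← sum_getD]; exact hS
        exact (Finset.sum_eq_zero_iff_of_nonneg (fun i _ => hLpos i)).mp h0 j (Finset.mem_range.mpr hj)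
      · exact List.getD_eq_default _ _ (by omega)
    obtain ⟨hlen, hget⟩ := foldBase B U ori_L n hU hO robots hr (List.replicate U.length 0)
      (by simp [hU]) (fun _ => 0) (fun j => by simp [simF])
    rw [sum_getD, hlen]
    simp only [specV, if_pos hS, valV]
    refine Finset.sum_congr rfl (fun j hj => ?_)
    rw [hget j, hz j]
    simp
  · rw [if_neg hS]
    have hS' : 0 < L.sum := lt_of_le_of_ne (sum_nonneg_getD L hLpos) (Ne.symm hS)
    -- every qualifying branch of A's loop has the same value w
    have hbranch : ∀ ir, ir < robots.length → 0 < pvGetI L (pvGetI (pvGetR robots (ir : Int)) 1) →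
        removeRobot_rec (robots.eraseIdx ir)
          (PySem.List.pySetD L (pvGetI (pvGetR robots (ir : Int)) 1) (pvGetI L (pvGetI (pvGetR robots (ir : Int)) 1) - 1))
          (PySem.List.pySetD U (pvGetI (pvGetR robots (ir : Int)) 1) (pvGetI U (pvGetI (pvGetR robots (ir : Int)) 1) - 1)) B N ori_L
        = (if feasV n (typesL n robots) L then
            (if L.sum = 1 then valV B ori_L n (typesL n robots) L U
             else max (valV B ori_L n (typesL n robots) L U) (-1))
           else (-1 : Int)) := by
      intro ir hlt hq
      have hgR : pvGetR robots (ir : Int) = robots[ir] := by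
        rw [pvGetR, PySem.List.pyGetD_natCast, List.getD_eq_getElem _ _ hlt]
      set r := robots[ir] with hrdef
      have hrmem : r ∈ robots := List.getElem_mem hlt
      have hrr := hr r hrmem
      have hn : 0 < n := pos_of_robot n r hrr
      have hsl := slot_lt n r hn
      set sl := (slotI n r).toNat with hsldef
      have hsn : sl < n := by omega
      rw [hgR] at hq ⊢
      rw [pvGetI_slot L n r hL hrr] at hq ⊢
      rw [← hsldef] at hq
      rw [pvGetI_slot U n r hU hrr, pvSetD_slot L n r _ hL hrr, pvSetD_slot U n r _ hU hrr]
      set L' := L.set sl (L.getD sl 0 - 1) with hL'def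
      set U' := U.set sl (U.getD sl 0 - 1) with hU'def
      have hL'len : L'.length = n := by simp [hL'def, hL]
      have hU'len : U'.length = n := by simp [hU'def, hU]
      have hL'get : ∀ j, L'.getD j 0 = if j = sl then L.getD sl 0 - 1 else L.getD j 0 :=
        fun j => getD_set_int L sl j _ (by omega)
      have hU'get : ∀ j, U'.getD j 0 = if j = sl then U.getD sl 0 - 1 else U.getD j 0 :=
        fun j => getD_set_int U sl j _ (by omega)
      have hL'pos : ∀ j, 0 ≤ L'.getD j 0 := by
        intro j; rw [hL'get j]; split_ifs with h <;> [omega; exact hLpos j]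
      have hL'sum : L'.sum = L.sum - 1 := by
        rw [hL'def, sum_set_int L sl _ (by omega)]; ring
      have hcount : ∀ j : Nat, j < n →
          ((typesL n (robots.eraseIdx ir)).count (j : Int) : Int) - L'.getD j 0
            = ((typesL n robots).count (j : Int) : Int) - L.getD j 0 := by
        intro j hj
        have hce := count_types_erase n robots ir hlt (j : Int)
        rw [← hrdef] at hce
        rw [hL'get j]
        by_cases hjs : j = sl
        · rw [if_pos (by omega : slotI n r = (j : Int))] at hce
          rw [if_pos hjs]
          have hLj : L.getD j 0 = L.getD sl 0 := by rw [hjs]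
          omega
        · rw [if_neg (by omega : ¬ slotI n r = (j : Int))] at hce
          rw [if_neg hjs]
          omega
      have hdiff : ∀ j : Nat, j < n → U'.getD j 0 - L'.getD j 0 = U.getD j 0 - L.getD j 0 := by
        intro j hj
        rw [hL'get j, hU'get j]
        split_ifs with h
        · rw [h]; ring
        · rfl
      have hval : valV B ori_L n (typesL n (robots.eraseIdx ir)) L' U'
          = valV B ori_L n (typesL n robots) L U := by
        refine Finset.sum_congr rfl (fun j hj => ?_)
        have hj := Finset.mem_range.mp hj
        rw [hcount j hj, hdiff j hj]
      have hiff : feasV n (typesL n (robots.eraseIdx ir)) L' = true ↔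
          feasV n (typesL n robots) L = true := by
        rw [feasV_iff, feasV_iff]
        constructor <;> intro h j hj <;> have h2 := hcount j hj <;> have h3 := h j hj <;> omega
      have hfeas : feasV n (typesL n (robots.eraseIdx ir)) L' = feasV n (typesL n robots) L := by
        by_cases hx : feasV n (typesL n robots) L = true
        · rw [hx, hiff.mpr hx]
        · have hy : ¬ feasV n (typesL n (robots.eraseIdx ir)) L' = true := fun hc => hx (hiff.mp hc)
          rw [Bool.not_eq_true] at hx hy
          rw [hx, hy]
      have hchild := ih (robots.length - 1) (by omega) (robots.eraseIdx ir) L' U'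
        (by have := List.length_eraseIdx_of_lt (l := robots) (i := ir) hlt; omega) hL'len hU'len hL'pos
        (fun x hx => hr x (List.mem_of_mem_eraseIdx hx))
      rw [hchild]
      simp only [specV, hfeas, hval]
      by_cases hf : feasV n (typesL n robots) L = true
      · rw [if_pos hf, if_pos hf]
        by_cases hS1 : L.sum = 1
        · rw [if_pos (by omega : L'.sum = 0), if_pos hS1]
        · rw [if_neg (by omega : ¬ L'.sum = 0), if_neg hS1]
      · rw [if_neg hf, if_neg hf]
        have := sum_pos_of_unfeas n (typesL n (robots.eraseIdx ir)) L' hL'len hL'pos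
          (fun hc => hf (hiff.mp hc))
        rw [if_neg (by omega : ¬ L'.sum = 0)]
    -- evaluate the loop
    rw [aLoop_eq B N ori_L robots L U _ hbranch (List.range robots.length)
      (fun x hx => List.mem_range.mp hx) false (-1)]
    by_cases hf : feasV n (typesL n robots) L = true
    · -- a qualifying robot exists
      have hex : ∃ ir ∈ List.range robots.length, 0 < pvGetI L (pvGetI (pvGetR robots (ir : Int)) 1) := by
        obtain ⟨j, hjn', hjpos⟩ := exists_pos_slot L hS'
        have hjn : j < n := by omega
        have hcnt : 0 < (typesL n robots).count (j : Int) := by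
          have := (feasV_iff n (typesL n robots) L).mp hf j hjn
          omega
        obtain ⟨r, hrmem, hslot⟩ := List.exists_of_mem_map (List.count_pos_iff.mp hcnt)
        obtain ⟨ir, hlt, hig⟩ := List.getElem_of_mem hrmem
        refine ⟨ir, List.mem_range.mpr hlt, ?_⟩
        rw [pvGetR, PySem.List.pyGetD_natCast, List.getD_eq_getElem _ _ hlt, hig,
          pvGetI_slot L n r hL (hr r hrmem), hslot]
        simpa using hjpos
      rw [if_pos hex]
      simp only [specV, if_neg hS, if_pos hf]
      by_cases hS1 : L.sum = 1
      · rw [if_pos hS1]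
      · rw [if_neg hS1, max_assoc, max_self]
    · -- infeasible: every branch (if any) is -1, and so is the result
      simp only [if_neg hf]
      simp only [specV, if_neg hS, if_neg hf]
      by_cases hex : ∃ ir ∈ List.range robots.length, 0 < pvGetI L (pvGetI (pvGetR robots (ir : Int)) 1)
      · rw [if_pos hex, max_self]
      · rw [if_neg hex]
        simp

lemma getD_replicate_zero (n j : Nat) : (List.replicate n (0 : Int)).getD j 0 = 0 := by
  by_cases hj : j < n
  · rw [List.getD_eq_getElem _ _ (by simpa using hj)]
    simp
  · rw [List.getD_eq_default _ _ (by simpa using (by omega : n ≤ j))]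

-- a zip of two equal-length lists, written as positional pairs
lemma zip_eq_map_range {a b : Type} (da : a) (db : b) (xs : List a) (ys : List b) (n : Nat)
    (hx : xs.length = n) (hy : ys.length = n) :
    xs.zip ys = (List.range n).map (fun j => (xs.getD j da, ys.getD j db)) := by
  apply List.ext_getElem (by simp [hx, hy])
  intro i h1 h2
  have hi : i < n := by simpa [hx, hy] using h2
  simp only [List.getElem_zip, List.getElem_map, List.getElem_range]
  rw [List.getD_eq_getElem _ _ (by omega), List.getD_eq_getElem _ _ (by omega)]

lemma foldl_add_zero {g : Type} (f : g → Int) (l : List g) (h : ∀ q ∈ l, f q = 0) :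
    ∀ init : Int, l.foldl (fun tot q => tot + f q) init = init := by
  induction l with
  | nil => intro init; rfl
  | cons x l ih =>
    intro init
    rw [List.foldl_cons, h x (by simp), add_zero]
    exact ih (fun q hq => h q (by simp [hq])) init

-- B on well-formed inputs: feasibility-guarded per-slot simulation
lemma alt_eq (B N : Int) (ori_L : List Int) (n : Nat) (robots : List (List Int)) (L U : List Int)
    (hL : L.length = n) (hU : U.length = n) (hO : ori_L.length = n)
    (hLpos : ∀ j, 0 ≤ L.getD j 0)
    (hr : ∀ r ∈ robots, -(n : Int) ≤ pvGetI r 1 ∧ pvGetI r 1 < (n : Int)) :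
    removeRobot_rec_alt robots L U B N ori_L =
      if feasV n (typesL n robots) L then valV B ori_L n (typesL n robots) L U else -1 := by
  rw [removeRobot_rec_alt]
  obtain ⟨hlen, hget⟩ := foldCnt n robots hr (List.replicate U.length 0) (by simp [hU])
  set cnt := robots.foldl (fun c robot =>
    PySem.List.pySetD c (pvGetI robot 1) (pvGetI c (pvGetI robot 1) + 1)) (List.replicate U.length 0)
    with hcnt
  have hcget : ∀ j : Nat, cnt.getD j 0 = ((typesL n robots).count (j : Int) : Int) := by
    intro j
    rw [hget j, getD_replicate_zero]
    ring
  have hzl : cnt.zip L = (List.range n).map (fun j => (cnt.getD j 0, L.getD j 0)) :=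
    zip_eq_map_range 0 0 cnt L n hlen hL
  have hzu : U.zip ori_L = (List.range n).map (fun j => (U.getD j 0, ori_L.getD j 0)) :=
    zip_eq_map_range 0 0 U ori_L n hU hO
  rw [hzl, hzu, List.zip_map']
  cases hx : feasV n (typesL n robots) L
  · -- infeasible: the any fires at a violated slot
    have hx2 : ¬ (∀ j < n, L.getD j 0 ≤ ((typesL n robots).count (j : Int) : Int)) := by
      rw [← feasV_iff]
      simp [hx]
    push_neg at hx2
    obtain ⟨j, hj, hjlt⟩ := hx2
    have hfire : ((List.range n).map (fun j => (cnt.getD j 0, L.getD j 0))).any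
        (fun p => p.2 < 0 || p.1 < p.2) = true := by
      refine List.any_eq_true.mpr ⟨(cnt.getD j 0, L.getD j 0),
        List.mem_map_of_mem (List.mem_range.mpr hj), ?_⟩
      have := hcget j
      simp only [Bool.or_eq_true, decide_eq_true_eq]
      omega
    rw [if_pos hfire]
    simp
  · -- feasible: the any is false, the fold is the per-slot sum
    have hq : ((List.range n).map (fun j => (cnt.getD j 0, L.getD j 0))).any
        (fun p => p.2 < 0 || p.1 < p.2) = false := by
      refine List.any_eq_false.mpr (fun x hxm => ?_)
      obtain ⟨j, hjm, rfl⟩ := List.mem_map.mp hxm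
      have hjn := List.mem_range.mp hjm
      have h1 := hLpos j
      have h2 := (feasV_iff n (typesL n robots) L).mp hx j hjn
      have h3 := hcget j
      simp only [Bool.or_eq_true, decide_eq_true_eq]
      push_neg
      omega
    rw [if_neg (by rw [hq]; simp), if_pos rfl, List.foldl_map]
    show (List.range n).foldl (fun (tot : Int) (j : Nat) =>
        tot + (List.range (cnt.getD j 0 - L.getD j 0).toNat).foldl
          (fun a _ => bSimStep B (ori_L.getD j 0) (U.getD j 0 - L.getD j 0) a) 0) 0
      = valV B ori_L n (typesL n robots) L U
    rw [foldl_range_add (fun j =>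
        (List.range (cnt.getD j 0 - L.getD j 0).toNat).foldl
          (fun a _ => bSimStep B (ori_L.getD j 0) (U.getD j 0 - L.getD j 0) a) 0) n 0,
      zero_add, valV]
    refine Finset.sum_congr rfl (fun j _ => ?_)
    rw [hcget j, foldSim]

-- B answers -1 as soon as some common slot has a negative or unsatisfiable demand
lemma alt_fires (B N : Int) (ori_L : List Int) (robots : List (List Int)) (L U : List Int)
    (hr : ∀ r ∈ robots, -(U.length : Int) ≤ pvGetI r 1 ∧ pvGetI r 1 < (U.length : Int))
    (hex : ∃ t, t < min L.length U.length ∧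
      (L.getD t 0 < 0 ∨ ((typesL U.length robots).count (t : Int) : Int) < L.getD t 0)) :
    removeRobot_rec_alt robots L U B N ori_L = -1 := by
  rw [removeRobot_rec_alt]
  obtain ⟨hlen, hget⟩ := foldCnt U.length robots hr (List.replicate U.length 0) (by simp)
  set cnt := robots.foldl (fun c robot =>
    PySem.List.pySetD c (pvGetI robot 1) (pvGetI c (pvGetI robot 1) + 1)) (List.replicate U.length 0)
    with hcnt
  obtain ⟨t, ht, hcond⟩ := hex
  have htc : t < (cnt.zip L).length := by
    rw [List.length_zip, hlen]
    omega
  have helem : (cnt.zip L)[t] = (cnt.getD t 0, L.getD t 0) := by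
    rw [List.getElem_zip]
    rw [List.getD_eq_getElem _ _ (by omega : t < cnt.length),
        List.getD_eq_getElem _ _ (by omega : t < L.length)]
  have hfire : (cnt.zip L).any (fun p => p.2 < 0 || p.1 < p.2) = true := by
    refine List.any_eq_true.mpr ⟨(cnt.zip L)[t], List.getElem_mem htc, ?_⟩
    rw [helem]
    have h3 : cnt.getD t 0 = ((typesL U.length robots).count (t : Int) : Int) := by
      rw [hget t, getD_replicate_zero]
      ring
    simp only [Bool.or_eq_true, decide_eq_true_eq]
    omega
  rw [if_pos hfire]

-- on empty robots with all-zero common slots both sides are 0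
lemma empty_eq (L U : List Int) (B N : Int) (ori_L : List Int)
    (hS : L.sum = 0) (hz : ∀ t < min L.length U.length, L.getD t 0 = 0) :
    removeRobot_rec [] L U B N ori_L = removeRobot_rec_alt [] L U B N ori_L := by
  rw [removeRobot_rec, if_pos hS, removeRobot_rec_alt]
  simp only [List.foldl_nil]
  have hanyf : ((List.replicate U.length (0 : Int)).zip L).any
      (fun p => p.2 < 0 || p.1 < p.2) = false := by
    refine List.any_eq_false.mpr (fun x hx => ?_)
    obtain ⟨i, hi, hxe⟩ := List.mem_iff_getElem.mp hx
    have hiz : i < min L.length U.length := by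
      rw [List.length_zip, List.length_replicate] at hi
      omega
    rw [← hxe, List.getElem_zip]
    have hLi0 : L[i]'(by omega) = 0 := by
      have h := hz i hiz
      rw [List.getD_eq_getElem _ _ (by omega)] at h
      exact h
    simp [hLi0]
  rw [if_neg (by simp [hanyf])]
  have hzero : (((List.replicate U.length (0 : Int)).zip L).zip (U.zip ori_L)).foldl
      (fun (tot : Int) q =>
        tot + (List.range (q.1.1 - q.1.2).toNat).foldl
          (fun a _ => bSimStep B q.2.2 (q.2.1 - q.1.2) a) 0) 0 = 0 := by
    refine foldl_add_zero (fun q : (Int × Int) × (Int × Int) =>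
      (List.range (q.1.1 - q.1.2).toNat).foldl
        (fun a _ => bSimStep B q.2.2 (q.2.1 - q.1.2) a) 0) _ (fun q hq => ?_) 0
    obtain ⟨i, hi, hxe⟩ := List.mem_iff_getElem.mp hq
    have hil : i < min L.length U.length := by
      rw [List.length_zip, List.length_zip, List.length_replicate] at hi
      omega
    rw [← hxe, List.getElem_zip, List.getElem_zip, List.getElem_replicate]
    have hLi0 : L[i]'(by omega) = 0 := by
      have h := hz i hil
      rw [List.getD_eq_getElem _ _ (by omega)] at h
      exact h
    simp [hLi0]
  rw [hzero]
  simp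

-- A answers -1 when sum(L) is nonzero but no robot's slot has a positive L entry
lemma stuck_eq (B N : Int) (ori_L : List Int) (robots : List (List Int)) (L U : List Int)
    (hS : L.sum ≠ 0) (hstuck : ∀ r ∈ robots, pvGetI L (pvGetI r 1) ≤ 0) :
    removeRobot_rec robots L U B N ori_L = -1 := by
  rw [removeRobot_rec, if_neg hS]
  rw [aLoop_eq B N ori_L robots L U (-1) ?_ (List.range robots.length)
    (fun x hx => List.mem_range.mp hx) false (-1)]
  · split_ifs <;> simp
  · intro ir hlt hq
    exfalso
    have hgR : pvGetR robots (ir : Int) = robots[ir] := by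
      rw [pvGetR, PySem.List.pyGetD_natCast, List.getD_eq_getElem _ _ hlt]
    rw [hgR] at hq
    have := hstuck robots[ir] (List.getElem_mem hlt)
    omega

-- ===== VERDICT (by name: the statement is the Claim_ definition above) =====
theorem removeRobot_rec_spec : Claim_equal_removeRobot_rec := by
  intro robots L U B N ori_L hdom hpre
  rw [Spec_removeRobot_rec]
  rcases hpre with ⟨hUL, hO, hrob, hLnn, hsum⟩ | ⟨hS, hrob, hstuck, hcase⟩ | ⟨hre, hS, hz⟩
  · -- well-formed branch
    have hr : ∀ r ∈ robots, -(L.length : Int) ≤ pvGetI r 1 ∧ pvGetI r 1 < (L.length : Int) :=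
      fun r hrm => ⟨(hrob r hrm).2.1, (hrob r hrm).2.2⟩
    have hLpos : ∀ j, 0 ≤ L.getD j 0 := by
      intro j
      by_cases hj : j < L.length
      · rw [List.getD_eq_getElem L 0 hj]
        exact hLnn _ (List.getElem_mem hj)
      · rw [List.getD_eq_default _ _ (by omega)]
    rw [main_eq B N ori_L L.length hO robots.length robots L U le_rfl rfl hUL hLpos hr,
        alt_eq B N ori_L L.length robots L U rfl hUL hO hLpos hr]
    by_cases hS : L.sum = 0
    · have hz : ∀ j, L.getD j 0 = 0 := by
        intro j
        by_cases hj : j < L.length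
        · have h0 : ∑ i ∈ Finset.range L.length, L.getD i 0 = 0 := by rw [← sum_getD]; exact hS
          exact (Finset.sum_eq_zero_iff_of_nonneg (fun i _ => hLpos i)).mp h0 j (Finset.mem_range.mpr hj)
        · exact List.getD_eq_default _ _ (by omega)
      have hfeas : feasV L.length (typesL L.length robots) L = true := by
        rw [feasV_iff]
        intro j hj
        rw [hz j]
        positivity
      rw [specV, if_pos hS, if_pos hfeas]
    · rw [specV, if_neg hS]
      cases hf : feasV L.length (typesL L.length robots) L
      · rfl
      · have hLU : ∀ j < L.length, L.getD j 0 ≤ U.getD j 0 := by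
          rcases hsum with h0 | hLU | ⟨j, hj, hlt⟩
          · exact absurd h0 hS
          · exact hLU
          · exact absurd ((feasV_iff L.length (typesL L.length robots) L).mp hf j hj) (by omega)
        have hv : 0 ≤ valV B ori_L L.length (typesL L.length robots) L U := by
          rw [valV]
          refine Finset.sum_nonneg (fun j hj => ?_)
          exact simF_nonneg _ _ _ (by have := hLU j (Finset.mem_range.mp hj); omega) _
        rw [max_eq_left (by omega)]
  · -- trivially infeasible branch: both sides are -1
    rw [stuck_eq B N ori_L robots L U hS hstuck]
    have hrU : ∀ r ∈ robots, -(U.length : Int) ≤ pvGetI r 1 ∧ pvGetI r 1 < (U.length : Int) :=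
      fun r hrm => ⟨(hrob r hrm).2.2.2.1, (hrob r hrm).2.2.2.2⟩
    have hrL : ∀ r ∈ robots, -(L.length : Int) ≤ pvGetI r 1 ∧ pvGetI r 1 < (L.length : Int) :=
      fun r hrm => ⟨(hrob r hrm).2.1, (hrob r hrm).2.2.1⟩
    rcases hcase with ⟨t, ht, hneg⟩ | ⟨hULeq, hSpos⟩ | ⟨hrE, t, ht, hne⟩
    · rw [alt_fires B N ori_L robots L U hrU ⟨t, ht, Or.inl hneg⟩]
    · obtain ⟨j, hj, hjpos⟩ := exists_pos_slot L hSpos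
      have hcnt0 : (typesL U.length robots).count ((j : Nat) : Int) = 0 := by
        rw [hULeq, List.count_eq_zero]
        intro hmemj
        obtain ⟨r, hrm, hrk⟩ := List.exists_of_mem_map hmemj
        have h2 := hstuck r hrm
        rw [pvGetI_slot L L.length r rfl (hrL r hrm)] at h2
        have h3 : (slotI L.length r).toNat = j := by omega
        rw [h3] at h2
        omega
      rw [alt_fires B N ori_L robots L U hrU ⟨j, by omega, Or.inr (by rw [hcnt0]; simpa using hjpos)⟩]
    · subst hrE
      have hor : L.getD t 0 < 0 ∨
          ((typesL U.length ([] : List (List Int))).count (t : Int) : Int) < L.getD t 0 := by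
        rcases lt_or_gt_of_ne hne with h | h
        · exact Or.inl h
        · right
          simpa [typesL] using h
      rw [alt_fires B N ori_L [] L U (by simp) ⟨t, ht, hor⟩]
  · -- trivially empty branch: both sides are 0
    subst hre
    exact empty_eq L U B N ori_L hS hz
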